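-- pv_equiv track=rewrite | github.com/ltonetwork/lto-api.python | PyCLTO/Config.py | getAccountNumber
-- ===== SOURCE A (Python) =====
-- def getAccountNumber(secNameList):
--     x = 0
--     flag = True
--     while flag:
--         flag = False
--         for name in secNameList:
--             if str(x) in name:
--                 x += 1
--                 flag = True
--     return x
-- ===== SOURCE B (Python) =====
-- def getAccountNumber(secNameList):
--     # Index every contiguous substring of every name once, then scan
--     # upward for the first integer whose decimal string is not indexed.
--     subs = set()
--     for name in secNameList:
--         n = len(name)
--         for i in range(n):
--             for j in range(i + 1, n + 1):
--                 subs.add(name[i:j])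
--     x = 0
--     while str(x) in subs:
--         x += 1
--     return x
-- ===== Notes on version B (the rewrite author's own statement) =====
-- stated objective: alternative
-- what changed: Replaces A's flag-driven restart loop that rescans the whole name list for every candidate with a one-pass substring index (a set of all contiguous substrings) followed by a single upward scan for the first integer whose decimal string is not in the index.
import Mathlib
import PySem

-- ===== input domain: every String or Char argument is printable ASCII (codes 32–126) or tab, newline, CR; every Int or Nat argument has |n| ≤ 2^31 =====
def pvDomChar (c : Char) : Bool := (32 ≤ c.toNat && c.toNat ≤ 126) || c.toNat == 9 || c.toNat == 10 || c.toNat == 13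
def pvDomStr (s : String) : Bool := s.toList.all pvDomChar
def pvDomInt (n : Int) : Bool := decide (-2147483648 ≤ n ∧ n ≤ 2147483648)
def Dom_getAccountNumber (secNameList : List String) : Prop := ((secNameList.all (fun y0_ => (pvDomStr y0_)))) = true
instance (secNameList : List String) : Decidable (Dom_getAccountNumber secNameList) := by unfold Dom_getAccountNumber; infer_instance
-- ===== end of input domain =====

-- B replaces A's flag-driven restart loop (rescanning every name for each candidate)
-- with a substring index built once, then a single upward scan (objective: alternative).

-- ===== PORT A =====
-- shared helper (defined once, used by both ports): the set of all contiguous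
-- substrings name[i:j] of every name. B's index; A's port uses only its SIZE,
-- as the fuel bound of its while-loop (a totality guard, proven sufficient below).
def pvAllSubs (secNameList : List String) : PySem.Set String :=
  secNameList.foldl
    (fun acc name =>
      (PySem.List.pyRange 0 (PySem.Str.len name) 1).foldl
        (fun acc2 i =>
          (PySem.List.pyRange (i + 1) (PySem.Str.len name + 1) 1).foldl
            (fun acc3 j => PySem.Set.add acc3 (PySem.Str.slice name (some i) (some j)))
            acc2)
        acc)
    PySem.Set.empty

-- one pass of the 'for name in secNameList' loop: state is (x, flag)
def pvPassA (secNameList : List String) (x : Int) : Int × Bool :=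
  secNameList.foldl
    (fun st name => if PySem.Str.isIn (PySem.Int.toStr st.1) name then (st.1 + 1, true) else st)
    (x, false)

-- the 'while flag' loop; the Nat argument is a fuel bound (totality guard only:
-- pvLoopA_eq below proves the supplied fuel is never exhausted)
def pvLoopA (secNameList : List String) : Nat → Int → Int
  | 0, x => x
  | f + 1, x =>
    if (pvPassA secNameList x).2 then pvLoopA secNameList f (pvPassA secNameList x).1
    else (pvPassA secNameList x).1

def getAccountNumber (secNameList : List String) : Int :=
  pvLoopA secNameList ((pvAllSubs secNameList).length + 2) 0

-- ===== PORT B =====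
-- 'while str(x) in subs: x += 1'; the Nat argument is a fuel bound (totality guard
-- only: pvLoopB_eq below proves the supplied fuel is never exhausted)
def pvLoopB (subs : PySem.Set String) : Nat → Int → Int
  | 0, x => x
  | f + 1, x =>
    if PySem.Set.contains subs (PySem.Int.toStr x) then pvLoopB subs f (x + 1) else x

def getAccountNumber_alt (secNameList : List String) : Int :=
  pvLoopB (pvAllSubs secNameList) ((pvAllSubs secNameList).length + 1) 0

-- ===== PRECONDITION & SPEC =====
def Spec_getAccountNumber (secNameList : List String) (out : Int) : Prop := out = getAccountNumber_alt secNameList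
instance (secNameList : List String) (out : Int) : Decidable (Spec_getAccountNumber secNameList out) := by unfold Spec_getAccountNumber; infer_instance

-- ===== CLAIM (what is proved, stated in full; the proofs are below) =====
def Claim_equal_getAccountNumber : Prop := ∀ (secNameList : List String), Dom_getAccountNumber secNameList → Spec_getAccountNumber secNameList (getAccountNumber secNameList)

-- ===== LEMMAS AND PROOFS =====

-- 'x is present': str(x) occurs in some name (the predicate A's pass tests name by name)
def pvPresent (l : List String) (v : Int) : Bool :=
  l.any fun name => PySem.Str.isIn (PySem.Int.toStr v) name

-- ---- decimal-string facts (Nat.toDigits characterised by Nat.digits) ----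

theorem pvToDigitsCore_eq (f : Nat) : ∀ (n : Nat) (acc : List Char), n < f → 0 < n →
    Nat.toDigitsCore 10 f n acc = ((Nat.digits 10 n).map Nat.digitChar).reverse ++ acc := by
  induction f with
  | zero => intro n acc h hn; omega
  | succ f ih =>
    intro n acc h hn
    rw [Nat.toDigitsCore]
    by_cases h0 : n / 10 = 0
    · simp only [h0, if_pos]
      rw [Nat.digits_def' (by norm_num : (1:Nat) < 10) hn, h0]
      simp
    · simp only [h0, if_neg, not_false_iff]
      have hlt : n / 10 < n := Nat.div_lt_self hn (by norm_num)
      rw [ih (n / 10) _ (by omega) (Nat.pos_of_ne_zero h0)]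
      rw [Nat.digits_def' (by norm_num : (1:Nat) < 10) hn]
      simp

theorem pvToDigits10_pos (n : Nat) (hn : 0 < n) :
    Nat.toDigits 10 n = ((Nat.digits 10 n).map Nat.digitChar).reverse := by
  rw [Nat.toDigits, pvToDigitsCore_eq (n + 1) n [] (Nat.lt_succ_self n) hn]
  simp

theorem pvToDigits10_zero : Nat.toDigits 10 0 = ['0'] := by decide

theorem pvDigitChar_inj (a b : Nat) (ha : a < 10) (hb : b < 10)
    (h : Nat.digitChar a = Nat.digitChar b) : a = b := by
  interval_cases a <;> interval_cases b <;> first | rfl | (exfalso; revert h; decide)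

theorem pvDigitChar_ne_dash (a : Nat) (ha : a < 10) : Nat.digitChar a ≠ '-' := by
  interval_cases a <;> decide

theorem pvMapDC_inj : ∀ (l1 l2 : List Nat), (∀ a ∈ l1, a < 10) → (∀ a ∈ l2, a < 10) →
    l1.map Nat.digitChar = l2.map Nat.digitChar → l1 = l2 := by
  intro l1
  induction l1 with
  | nil => intro l2 _ _ h; cases l2 <;> simp_all
  | cons a t ih =>
    intro l2 h1 h2 h
    cases l2 with
    | nil => simp_all
    | cons b t2 =>
      simp only [List.map_cons, List.cons.injEq] at h
      have ha := pvDigitChar_inj a b (h1 a (by simp)) (h2 b (by simp)) h.1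
      have := ih t2 (fun x hx => h1 x (by simp [hx])) (fun x hx => h2 x (by simp [hx])) h.2
      simp [ha, this]

theorem pvToDigits10_inj (n m : Nat) (h : Nat.toDigits 10 n = Nat.toDigits 10 m) : n = m := by
  have key : ∀ k : Nat, 0 < k → Nat.toDigits 10 k ≠ ['0'] := by
    intro k hk hcon
    rw [pvToDigits10_pos k hk] at hcon
    have h1 : (Nat.digits 10 k).map Nat.digitChar = ['0'] := by
      have := congrArg List.reverse hcon
      simpa using this
    have h2 : Nat.digits 10 k = [0] := by
      apply pvMapDC_inj _ [0] (fun a ha => Nat.digits_lt_base (by norm_num) ha) (by norm_num)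
      simpa using h1
    have := Nat.ofDigits_digits 10 k
    rw [h2] at this
    simp [Nat.ofDigits] at this
    omega
  rcases Nat.eq_zero_or_pos n with hn | hn <;> rcases Nat.eq_zero_or_pos m with hm | hm
  · omega
  · exfalso; exact key m hm (by rw [← h, hn]; exact pvToDigits10_zero)
  · exfalso; exact key n hn (by rw [h, hm]; exact pvToDigits10_zero)
  · rw [pvToDigits10_pos n hn, pvToDigits10_pos m hm] at h
    have h1 : (Nat.digits 10 n).map Nat.digitChar = (Nat.digits 10 m).map Nat.digitChar := by
      have := congrArg List.reverse h
      simpa using this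
    have h2 : Nat.digits 10 n = Nat.digits 10 m :=
      pvMapDC_inj _ _ (fun a ha => Nat.digits_lt_base (by norm_num) ha)
        (fun a ha => Nat.digits_lt_base (by norm_num) ha) h1
    have := Nat.ofDigits_digits 10 n
    rw [h2, Nat.ofDigits_digits] at this
    omega

theorem pvToDigits10_ne_nil (n : Nat) : Nat.toDigits 10 n ≠ [] := by
  rcases Nat.eq_zero_or_pos n with hn | hn
  · subst hn; rw [pvToDigits10_zero]; simp
  · rw [pvToDigits10_pos n hn]
    simp [Nat.digits_ne_nil_iff_ne_zero, Nat.pos_iff_ne_zero.mp hn]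

theorem pvDash_not_mem_toDigits (n : Nat) : '-' ∉ Nat.toDigits 10 n := by
  rcases Nat.eq_zero_or_pos n with hn | hn
  · subst hn; rw [pvToDigits10_zero]; decide
  · rw [pvToDigits10_pos n hn]
    intro hmem
    simp only [List.mem_reverse, List.mem_map] at hmem
    obtain ⟨d, hd, hdc⟩ := hmem
    exact pvDigitChar_ne_dash d (Nat.digits_lt_base (by norm_num) hd) hdc

theorem pvToChars_ne_nil (v : Int) : PySem.Int.toChars v ≠ [] := by
  unfold PySem.Int.toChars
  split_ifs
  · simp
  · exact pvToDigits10_ne_nil _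

theorem pvToChars_inj (v w : Int) (h : PySem.Int.toChars v = PySem.Int.toChars w) : v = w := by
  unfold PySem.Int.toChars at h
  split_ifs at h with hv hw hw
  · simp only [List.cons.injEq, true_and] at h
    have := pvToDigits10_inj _ _ h
    omega
  · exfalso
    apply pvDash_not_mem_toDigits w.toNat
    rw [← h]; simp
  · exfalso
    apply pvDash_not_mem_toDigits v.toNat
    rw [h]; simp
  · have := pvToDigits10_inj _ _ h
    omega

theorem pvToStr_inj (v w : Int) (h : PySem.Int.toStr v = PySem.Int.toStr w) : v = w := by
  apply pvToChars_inj
  rw [← PySem.Int.toList_toStr, ← PySem.Int.toList_toStr, h]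

-- ---- infix ↔ drop/take slice ----

theorem pvInfix_iff_drop_take (ys cs : List Char) (hys : ys ≠ []) :
    ys <:+: cs ↔ ∃ i j : Nat, i < cs.length ∧ i < j ∧ j ≤ cs.length ∧
      (cs.drop i).take (j - i) = ys := by
  constructor
  · rintro ⟨pre, suf, rfl⟩
    have hlen : 0 < ys.length := List.length_pos_iff.mpr hys
    refine ⟨pre.length, pre.length + ys.length, ?_, by omega, ?_, ?_⟩
    · simp only [List.length_append]; omega
    · simp only [List.length_append]; omega
    · rw [List.append_assoc, List.drop_left]
      simpa using List.take_left (l₁ := ys) (l₂ := suf)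
  · rintro ⟨i, j, hi, hij, hj, heq⟩
    refine ⟨cs.take i, (cs.drop i).drop (j - i), ?_⟩
    rw [← heq, List.append_assoc, List.take_append_drop, List.take_append_drop]

-- ---- membership in the substring index ----

theorem pvMem_foldl_set {α β : Type} [BEq β] [LawfulBEq β] (C : α → β → Prop)
    (g : PySem.Set β → α → PySem.Set β)
    (hg : ∀ a x y, y ∈ g a x ↔ y ∈ a ∨ C x y) :
    ∀ (L : List α) (acc : PySem.Set β) (y : β),
      y ∈ L.foldl g acc ↔ y ∈ acc ∨ ∃ x ∈ L, C x y := by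
  intro L
  induction L with
  | nil => intro acc y; simp
  | cons a t ih =>
    intro acc y
    simp only [List.foldl_cons, List.mem_cons]
    rw [ih, hg]
    constructor
    · rintro ((h | h) | ⟨x, hx, hc⟩)
      · exact Or.inl h
      · exact Or.inr ⟨a, Or.inl rfl, h⟩
      · exact Or.inr ⟨x, Or.inr hx, hc⟩
    · rintro (h | ⟨x, (rfl | hx), hc⟩)
      · exact Or.inl (Or.inl h)
      · exact Or.inl (Or.inr hc)
      · exact Or.inr ⟨x, hx, hc⟩

theorem pvMem_allSubs (l : List String) (s : String) :
    s ∈ pvAllSubs l ↔ ∃ name ∈ l, ∃ i j : Nat, i < name.toList.length ∧ i < j ∧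
      j ≤ name.toList.length ∧ (name.toList.drop i).take (j - i) = s.toList := by
  have hinner : ∀ (name : String) (i : Int) (acc2 : PySem.Set String) (y : String),
      y ∈ (PySem.List.pyRange (i + 1) (PySem.Str.len name + 1) 1).foldl
            (fun acc3 j => PySem.Set.add acc3 (PySem.Str.slice name (some i) (some j))) acc2 ↔
        y ∈ acc2 ∨ ∃ j ∈ PySem.List.pyRange (i + 1) (PySem.Str.len name + 1) 1,
          PySem.Str.slice name (some i) (some j) = y := by
    intro name i acc2 y
    exact pvMem_foldl_set (fun j y => PySem.Str.slice name (some i) (some j) = y) _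
      (fun a x y => by rw [PySem.Set.mem_add]; exact or_congr Iff.rfl eq_comm) _ acc2 y
  have hmid : ∀ (name : String) (acc : PySem.Set String) (y : String),
      y ∈ (PySem.List.pyRange 0 (PySem.Str.len name) 1).foldl
            (fun acc2 i => (PySem.List.pyRange (i + 1) (PySem.Str.len name + 1) 1).foldl
              (fun acc3 j => PySem.Set.add acc3 (PySem.Str.slice name (some i) (some j))) acc2) acc ↔
        y ∈ acc ∨ ∃ i ∈ PySem.List.pyRange 0 (PySem.Str.len name) 1,
          ∃ j ∈ PySem.List.pyRange (i + 1) (PySem.Str.len name + 1) 1,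
            PySem.Str.slice name (some i) (some j) = y := by
    intro name acc y
    exact pvMem_foldl_set _ _ (fun a x y => hinner name x a y) _ acc y
  have houter := pvMem_foldl_set
    (fun (name : String) (y : String) => ∃ i ∈ PySem.List.pyRange 0 (PySem.Str.len name) 1,
      ∃ j ∈ PySem.List.pyRange (i + 1) (PySem.Str.len name + 1) 1,
        PySem.Str.slice name (some i) (some j) = y)
    _ (fun a x y => hmid x a y) l PySem.Set.empty s
  unfold pvAllSubs
  rw [houter]
  simp only [PySem.Set.empty, List.not_mem_nil, false_or]
  constructor
  · rintro ⟨name, hname, i, hi, j, hj, hslice⟩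
    rw [PySem.List.mem_pyRange_one] at hi hj
    rw [PySem.Str.len_eq] at hi hj
    refine ⟨name, hname, i.toNat, j.toNat, by omega, by omega, by omega, ?_⟩
    have := congrArg String.toList hslice
    rw [PySem.Str.toList_slice, PySem.Chars.slice_eq_listSlice,
      PySem.List.slice_toNat _ (by omega) (by omega)] at this
    exact this
  · rintro ⟨name, hname, i, j, hi, hij, hj, heq⟩
    refine ⟨name, hname, (i : Int), ?_, (j : Int), ?_, ?_⟩
    · rw [PySem.List.mem_pyRange_one, PySem.Str.len_eq]; omega
    · rw [PySem.List.mem_pyRange_one, PySem.Str.len_eq]; omega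
    · rw [← String.toList_inj, PySem.Str.toList_slice, PySem.Chars.slice_eq_listSlice,
        PySem.List.slice_toNat _ (by omega) (by omega)]
      simpa using heq

theorem pvPresent_iff (l : List String) (v : Int) :
    pvPresent l v = true ↔ PySem.Int.toStr v ∈ pvAllSubs l := by
  have hne : (PySem.Int.toStr v).toList ≠ [] := by
    rw [PySem.Int.toList_toStr]; exact pvToChars_ne_nil v
  rw [pvMem_allSubs]
  unfold pvPresent
  rw [List.any_eq_true]
  constructor
  · rintro ⟨name, hname, hin⟩
    obtain ⟨i, j, hi, hij, hj, heq⟩ :=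
      (pvInfix_iff_drop_take _ _ hne).mp ((PySem.Str.isIn_iff_infix _ _).mp hin)
    exact ⟨name, hname, i, j, hi, hij, hj, heq⟩
  · rintro ⟨name, hname, i, j, hi, hij, hj, heq⟩
    refine ⟨name, hname, (PySem.Str.isIn_iff_infix _ _).mpr ?_⟩
    exact (pvInfix_iff_drop_take _ _ hne).mpr ⟨i, j, hi, hij, hj, heq⟩

-- ---- the answer M: least k with pvPresent l k = false ----

theorem pvExists_missing (l : List String) :
    ∃ k : Nat, k ≤ (pvAllSubs l).length ∧ pvPresent l (k : Int) = false := by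
  by_contra hcon
  push Not at hcon
  have hall : ∀ k : Nat, k ≤ (pvAllSubs l).length → pvPresent l (k : Int) = true := by
    intro k hk
    have := hcon k hk
    simpa using this
  set L := (pvAllSubs l).length with hL
  set R := (List.range (L + 1)).map (fun k : Nat => PySem.Int.toStr (k : Int)) with hR
  have hnodup : R.Nodup := by
    apply List.Nodup.map _ (List.nodup_range)
    intro a b hab
    have := pvToStr_inj _ _ hab
    omega
  have hsub : R.toFinset ⊆ (pvAllSubs l).toFinset := by
    intro y hy
    simp only [hR, List.mem_toFinset, List.mem_map, List.mem_range] at hy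
    obtain ⟨k, hk, rfl⟩ := hy
    rw [List.mem_toFinset]
    exact (pvPresent_iff l k).mp (hall k (by omega))
  have h1 : R.toFinset.card = L + 1 := by
    rw [List.toFinset_card_of_nodup hnodup]
    simp [hR]
  have h2 := Finset.card_le_card hsub
  have h3 := List.toFinset_card_le (pvAllSubs l)
  omega

theorem pvExists_missing' (l : List String) : ∃ k : Nat, pvPresent l (k : Int) = false :=
  (pvExists_missing l).elim fun k hk => ⟨k, hk.2⟩

def pvM (l : List String) : Nat := Nat.find (pvExists_missing' l)

theorem pvM_not_present (l : List String) : pvPresent l (pvM l : Int) = false :=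
  Nat.find_spec (pvExists_missing' l)

theorem pvM_min (l : List String) (k : Nat) (hk : k < pvM l) : pvPresent l (k : Int) = true := by
  have := Nat.find_min (pvExists_missing' l) hk
  simpa using this

theorem pvM_min_int (l : List String) (x : Int) (h0 : 0 ≤ x) (hx : x < (pvM l : Int)) :
    pvPresent l x = true := by
  have : x = ((x.toNat : Nat) : Int) := by omega
  rw [this]; exact pvM_min l x.toNat (by omega)

theorem pvM_le (l : List String) : pvM l ≤ (pvAllSubs l).length := by
  obtain ⟨k, hk, hp⟩ := pvExists_missing l
  exact le_trans (Nat.find_min' (pvExists_missing' l) hp) hk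

-- ---- properties of A's pass ----

theorem pvPass_fst_mono : ∀ (t : List String) (x : Int) (b : Bool),
    x ≤ (t.foldl (fun st name => if PySem.Str.isIn (PySem.Int.toStr st.1) name then (st.1 + 1, true) else st) (x, b)).1 := by
  intro t
  induction t with
  | nil => intro x b; simp
  | cons a t ih =>
    intro x b
    simp only [List.foldl_cons]
    by_cases hin : PySem.Str.isIn (PySem.Int.toStr x) a = true
    · simp only [hin, if_pos]
      have := ih (x + 1) true
      omega
    · simp only [hin, if_neg, Bool.not_eq_true]
      simpa using ih x b

theorem pvPass_snd_true : ∀ (t : List String) (x : Int),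
    (t.foldl (fun st name => if PySem.Str.isIn (PySem.Int.toStr st.1) name then (st.1 + 1, true) else st) (x, true)).2 = true := by
  intro t
  induction t with
  | nil => intro x; simp
  | cons a t ih =>
    intro x
    simp only [List.foldl_cons]
    by_cases hin : PySem.Str.isIn (PySem.Int.toStr x) a = true
    · simp only [hin, if_pos]; exact ih (x + 1)
    · simp only [hin, if_neg, Bool.not_eq_true]
      simpa using ih x

theorem pvPass_flagged (t : List String) (x : Int)
    (h : (t.foldl (fun st name => if PySem.Str.isIn (PySem.Int.toStr st.1) name then (st.1 + 1, true) else st) (x, false)).2 = true) :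
    x < (t.foldl (fun st name => if PySem.Str.isIn (PySem.Int.toStr st.1) name then (st.1 + 1, true) else st) (x, false)).1
      ∧ pvPresent t x = true := by
  induction t generalizing x with
  | nil => simp at h
  | cons a t ih =>
    simp only [List.foldl_cons] at h ⊢
    by_cases hin : PySem.Str.isIn (PySem.Int.toStr x) a = true
    · simp only [hin, if_pos] at h ⊢
      constructor
      · have := pvPass_fst_mono t (x + 1) true
        omega
      · unfold pvPresent
        simp only [List.any_cons, hin, Bool.true_or]
    · simp only [hin, if_neg, Bool.not_eq_true] at h ⊢
      have h' : (t.foldl (fun st name => if PySem.Str.isIn (PySem.Int.toStr st.1) name then (st.1 + 1, true) else st) (x, false)).2 = true := by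
        simpa using h
      obtain ⟨h1, h2⟩ := ih x h'
      refine ⟨by simpa using h1, ?_⟩
      unfold pvPresent at h2 ⊢
      simp only [List.any_cons, h2, hin, Bool.false_or]

theorem pvPass_unflagged (t : List String) (x : Int)
    (h : (t.foldl (fun st name => if PySem.Str.isIn (PySem.Int.toStr st.1) name then (st.1 + 1, true) else st) (x, false)).2 = false) :
    (t.foldl (fun st name => if PySem.Str.isIn (PySem.Int.toStr st.1) name then (st.1 + 1, true) else st) (x, false)).1 = x
      ∧ pvPresent t x = false := by
  induction t generalizing x with
  | nil => simp [pvPresent]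
  | cons a t ih =>
    simp only [List.foldl_cons] at h ⊢
    by_cases hin : PySem.Str.isIn (PySem.Int.toStr x) a = true
    · exfalso
      simp only [hin, if_pos] at h
      rw [pvPass_snd_true t (x + 1)] at h
      exact absurd h (by decide)
    · simp only [hin, if_neg, Bool.not_eq_true] at h ⊢
      have h' : (t.foldl (fun st name => if PySem.Str.isIn (PySem.Int.toStr st.1) name then (st.1 + 1, true) else st) (x, false)).2 = false := by
        simpa using h
      obtain ⟨h1, h2⟩ := ih x h'
      refine ⟨by simpa using h1, ?_⟩
      unfold pvPresent at h2 ⊢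
      simp only [List.any_cons, h2, hin, Bool.false_or]

theorem pvPass_bounded (l : List String) : ∀ (t : List String), (∀ y ∈ t, y ∈ l) →
    ∀ (x : Int) (b : Bool), 0 ≤ x → x ≤ (pvM l : Int) →
    (t.foldl (fun st name => if PySem.Str.isIn (PySem.Int.toStr st.1) name then (st.1 + 1, true) else st) (x, b)).1 ≤ (pvM l : Int) := by
  intro t
  induction t with
  | nil => intro _ x b _ hM; simpa using hM
  | cons a t ih =>
    intro hsub x b h0 hM
    simp only [List.foldl_cons]
    by_cases hin : PySem.Str.isIn (PySem.Int.toStr x) a = true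
    · simp only [hin, if_pos]
      have hpres : pvPresent l x = true := by
        simp only [pvPresent, List.any_eq_true]
        exact ⟨a, hsub a (by simp), hin⟩
      have hxM : x < (pvM l : Int) := by
        rcases lt_or_eq_of_le hM with h | h
        · exact h
        · exfalso; rw [h] at hpres; rw [pvM_not_present l] at hpres; exact absurd hpres (by decide)
      exact ih (fun y hy => hsub y (by simp [hy])) (x + 1) true (by omega) (by omega)
    · simp only [hin, if_neg, Bool.not_eq_true]
      exact ih (fun y hy => hsub y (by simp [hy])) x b h0 hM

-- ---- the two loops compute M ----

theorem pvLoopA_eq (l : List String) : ∀ (f : Nat) (x : Int), 0 ≤ x → x ≤ (pvM l : Int) →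
    pvM l - x.toNat < f → pvLoopA l f x = (pvM l : Int) := by
  intro f
  induction f with
  | zero => intro x h0 hM hf; omega
  | succ f ih =>
    intro x h0 hM hf
    rw [pvLoopA]
    by_cases hfl : (pvPassA l x).2 = true
    · rw [if_pos hfl]
      have hflag : (l.foldl (fun st name => if PySem.Str.isIn (PySem.Int.toStr st.1) name then (st.1 + 1, true) else st) (x, false)).2 = true := hfl
      obtain ⟨hlt, _⟩ := pvPass_flagged l x hflag
      have hb := pvPass_bounded l l (fun y hy => hy) x false h0 hM
      have hy : (pvPassA l x).1 = (l.foldl (fun st name => if PySem.Str.isIn (PySem.Int.toStr st.1) name then (st.1 + 1, true) else st) (x, false)).1 := rfl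
      rw [← hy] at hlt hb
      exact ih (pvPassA l x).1 (by omega) hb (by omega)
    · rw [if_neg hfl]
      have hflag : (l.foldl (fun st name => if PySem.Str.isIn (PySem.Int.toStr st.1) name then (st.1 + 1, true) else st) (x, false)).2 = false :=
        Bool.eq_false_iff.mpr hfl
      obtain ⟨h1, h2⟩ := pvPass_unflagged l x hflag
      have hxM : x = (pvM l : Int) := by
        rcases lt_or_eq_of_le hM with hlt | heq
        · exfalso
          rw [pvM_min_int l x h0 hlt] at h2
          exact absurd h2 (by decide)
        · exact heq
      have hx1 : (pvPassA l x).1 = x := h1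
      rw [hx1, hxM]

theorem pvLoopB_eq (l : List String) : ∀ (f : Nat) (x : Int), 0 ≤ x → x ≤ (pvM l : Int) →
    pvM l - x.toNat < f → pvLoopB (pvAllSubs l) f x = (pvM l : Int) := by
  intro f
  induction f with
  | zero => intro x h0 hM hf; omega
  | succ f ih =>
    intro x h0 hM hf
    rw [pvLoopB]
    have hmem : PySem.Set.contains (pvAllSubs l) (PySem.Int.toStr x) = true ↔ pvPresent l x = true := by
      rw [pvPresent_iff]
      exact List.contains_iff_mem
    rcases lt_or_eq_of_le hM with hx | hx
    · have hpres : pvPresent l x = true := pvM_min_int l x h0 hx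
      rw [if_pos (hmem.mpr hpres)]
      exact ih (x + 1) (by omega) (by omega) (by omega)
    · have hnot : pvPresent l x = false := by rw [hx]; exact pvM_not_present l
      have hcf : ¬ (PySem.Set.contains (pvAllSubs l) (PySem.Int.toStr x) = true) := by
        intro hc
        rw [hmem, hnot] at hc
        exact absurd hc (by decide)
      rw [if_neg hcf, hx]


theorem pvA_eq (l : List String) : getAccountNumber l = (pvM l : Int) := by
  have h := pvM_le l
  exact pvLoopA_eq l _ 0 le_rfl (by exact_mod_cast Nat.zero_le _) (by omega)

theorem pvB_eq (l : List String) : getAccountNumber_alt l = (pvM l : Int) := by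
  have h := pvM_le l
  exact pvLoopB_eq l _ 0 le_rfl (by exact_mod_cast Nat.zero_le _) (by omega)

-- ===== VERDICT (by name: the statement is the Claim_ definition above) =====
theorem getAccountNumber_spec : Claim_equal_getAccountNumber := by
  intro l _
  unfold Spec_getAccountNumber
  rw [pvA_eq, pvB_eq]
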